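-- pv_equiv track=rewrite | github.com/SeifedinS/Amharic-Text-Normalization | number_generator.py | subThousand
-- ===== SOURCE A (Python) =====
-- ByOne = [
-- "ዜሮ",
-- "አንድ",
-- "ሁለት",
-- "ሶስት",
-- "አራት",
-- "አምስት",
-- "ስድስት",
-- "ሰባት",
-- "ስምንት",
-- "ዘጠኝ",
-- "አስር",
-- "አስራ አንድ",
-- "አስራ ሁለት",
-- "አስራ ሶስት",
-- "አስራ አራት",
-- "አስራ አምስት",
-- "አስራ ስድስት",
-- "አስራ ሰባት",
-- "አስራ ስምንት",
-- "አስራ ዘጠኝ"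
-- ]
--
-- ByTen = [
-- "ዜሮ",
-- "አስር",
-- "ሃያ",
-- "ሰላሳ",
-- "አርባ",
-- "ሃምሳ",
-- "ስልሳ",
-- "ሰባ",
-- "ሰማንያ",
-- "ዘጠና"
-- ]
--
-- def subThousand(n):
--     assert(isinstance(n,(int, int)))
--     assert(0 <= n <= 999)
--     if n <= 19:
--         return ByOne[n]
--     elif n <= 99:
--         q, r = divmod(n, 10)
--         return ByTen[q] + (" " + subThousand(r) if r else "")
--     else:
--         q, r = divmod(n, 100)
--         return ByOne[q] + " መቶ" + (" " + subThousand(r) if r else "")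
-- ===== SOURCE B (Python) =====
-- ByOne = [
-- "ዜሮ","አንድ","ሁለት","ሶስት","አራት","አምስት","ስድስት","ሰባት","ስምንት","ዘጠኝ",
-- "አስር","አስራ አንድ","አስራ ሁለት","አስራ ሶስት","አስራ አራት","አስራ አምስት","አስራ ስድስት","አስራ ሰባት","አስራ ስምንት","አስራ ዘጠኝ"
-- ]
--
-- ByTen = ["ዜሮ","አስር","ሃያ","ሰላሳ","አርባ","ሃምሳ","ስልሳ","ሰባ","ሰማንያ","ዘጠና"]
--
-- def subThousand(n):
--     assert(isinstance(n,(int, int)))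
--     assert(0 <= n <= 999)
--     parts = []
--     m = n
--     if m >= 100:
--         h, m = divmod(m, 100)
--         parts.append(ByOne[h] + " መቶ")
--     if m <= 19:
--         if m != 0 or not parts:
--             parts.append(ByOne[m])
--     else:
--         t, u = divmod(m, 10)
--         parts.append(ByTen[t])
--         if u != 0:
--             parts.append(ByOne[u])
--     return " ".join(parts)
-- ===== Notes on version B (the rewrite author's own statement) =====
-- stated objective: alternative
-- what changed: Replaces A's recursive string concatenation with a single-pass iterative decomposition: split off the hundreds with divmod, collect word parts in a list, and join them with spaces.
import Mathlib
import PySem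

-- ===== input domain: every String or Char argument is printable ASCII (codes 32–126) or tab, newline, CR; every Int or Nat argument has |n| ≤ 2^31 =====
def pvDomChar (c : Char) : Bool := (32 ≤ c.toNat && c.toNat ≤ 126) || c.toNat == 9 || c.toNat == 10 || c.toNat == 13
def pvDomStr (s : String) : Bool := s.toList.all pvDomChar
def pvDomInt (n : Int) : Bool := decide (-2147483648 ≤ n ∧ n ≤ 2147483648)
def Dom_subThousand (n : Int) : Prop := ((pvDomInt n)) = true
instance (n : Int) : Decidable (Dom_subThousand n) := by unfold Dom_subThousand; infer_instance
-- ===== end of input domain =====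

-- B replaces A's recursive string concatenation with an iterative parts-list decomposition joined by spaces (objective: alternative, not faster).

-- ===== PORT A =====
def pvByOne : List String :=
["ዜሮ","አንድ","ሁለት","ሶስት","አራት","አምስት","ስድስት","ሰባት","ስምንት","ዘጠኝ",
 "አስር","አስራ አንድ","አስራ ሁለት","አስራ ሶስት","አስራ አራት","አስራ አምስት","አስራ ስድስት","አስራ ሰባት","አስራ ስምንት","አስራ ዘጠኝ"]

def pvByTen : List String :=
["ዜሮ","አስር","ሃያ","ሰላሳ","አርባ","ሃምሳ","ስልሳ","ሰባ","ሰማንያ","ዘጠና"]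

-- Python '+' on strings, kernel-transparent (exact: concatenation of the char lists)
def pvCat (a b : String) : String := String.ofList (a.toList ++ b.toList)

-- A's recursion, with fuel only to make the same computation total (recursion depth ≤ 2 on 0..999, so fuel 3 never runs out on Pre_)
def subAux (fuel : Nat) (n : Nat) : String :=
  match fuel with
  | 0 => ""
  | fuel + 1 =>
    if n ≤ 19 then pvByOne.getD n ""
    else if n ≤ 99 then
      pvCat (pvByTen.getD (n / 10) "") (if n % 10 ≠ 0 then pvCat " " (subAux fuel (n % 10)) else "")
    else
      pvCat (pvCat (pvByOne.getD (n / 100) "") " መቶ") (if n % 100 ≠ 0 then pvCat " " (subAux fuel (n % 100)) else "")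

def subThousand (n : Int) : String := subAux 3 n.toNat

-- ===== PORT B =====
def subThousand_alt (n : Int) : String :=
  let m0 := n.toNat
  let step1 : List String × Nat :=
    if 100 ≤ m0 then ([pvCat (pvByOne.getD (m0 / 100) "") " መቶ"], m0 % 100) else ([], m0)
  let parts : List String :=
    if step1.2 ≤ 19 then
      (if step1.2 ≠ 0 ∨ step1.1 = [] then step1.1 ++ [pvByOne.getD step1.2 ""] else step1.1)
    else
      (step1.1 ++ [pvByTen.getD (step1.2 / 10) ""]) ++
        (if step1.2 % 10 ≠ 0 then [pvByOne.getD (step1.2 % 10) ""] else [])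
  PySem.Str.join " " parts

-- ===== PRECONDITION & SPEC =====
-- Pre_: A's asserts raise AssertionError outside 0 ≤ n ≤ 999; exactly those inputs are excluded.
def Pre_subThousand (n : Int) : Prop := 0 ≤ n ∧ n ≤ 999
instance (n : Int) : Decidable (Pre_subThousand n) := by unfold Pre_subThousand; infer_instance
def pvWitness_subThousand : Int := (105)

def Spec_subThousand (n : Int) (out : String) : Prop := out = subThousand_alt n
instance (n : Int) (out : String) : Decidable (Spec_subThousand n out) := by unfold Spec_subThousand; infer_instance

-- ===== CLAIM (what is proved, stated in full; the proofs are below) =====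
def Claim_equal_subThousand : Prop := ∀ (n : Int), Dom_subThousand n → Pre_subThousand n → Spec_subThousand n (subThousand n)

-- ===== LEMMAS AND PROOFS =====

theorem pvStr_ext {a b : String} (h : a.toList = b.toList) : a = b := by
  have := congrArg String.ofList h
  simpa using this

theorem pvCat_toList (a b : String) : (pvCat a b).toList = a.toList ++ b.toList := by
  simp [pvCat]

theorem pvCat_empty (a : String) : pvCat a "" = a := by
  apply pvStr_ext; simp [pvCat_toList]

theorem pvJoin_singleton (x : String) : PySem.Str.join " " [x] = x := by
  apply pvStr_ext
  simp [PySem.Str.toList_join, PySem.Chars.join_singleton]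

theorem pvJoin_cons (x y : String) (rest : List String) :
    PySem.Str.join " " (x :: y :: rest) = pvCat x (pvCat " " (PySem.Str.join " " (y :: rest))) := by
  apply pvStr_ext
  simp [PySem.Str.toList_join, pvCat_toList, PySem.Chars.join_cons_cons]

-- the 0-99 word parts B produces for a nonzero remainder
def pvTail (r : Nat) : List String :=
  if r ≤ 19 then [pvByOne.getD r ""]
  else [pvByTen.getD (r / 10) ""] ++ (if r % 10 ≠ 0 then [pvByOne.getD (r % 10) ""] else [])

theorem pvTail_ne_nil (r : Nat) : pvTail r ≠ [] := by
  unfold pvTail; split_ifs <;> simp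

set_option maxRecDepth 4000 in
theorem pvLow : ∀ m : Nat, m < 100 → subThousand (m : Int) = subThousand_alt (m : Int) := by decide

set_option maxRecDepth 4000 in
theorem pvTail_eq : ∀ r : Nat, r < 100 → r ≠ 0 → subAux 2 r = PySem.Str.join " " (pvTail r) := by decide

-- ===== VERDICT (by name: the statement is the Claim_ definition above) =====
theorem subThousand_spec : Claim_equal_subThousand := by
  intro n _ hpre
  unfold Spec_subThousand
  obtain ⟨h0, h1⟩ := hpre
  have hn : ((n.toNat : Int)) = n := Int.toNat_of_nonneg h0
  rw [← hn]
  generalize n.toNat = m at *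
  have hm999 : m ≤ 999 := by omega
  by_cases hlow : m < 100
  · exact pvLow m hlow
  · rw [Nat.not_lt] at hlow
    have hr100 : m % 100 < 100 := Nat.mod_lt _ (by norm_num)
    unfold subThousand subThousand_alt
    rw [Int.toNat_natCast]
    have hA : subAux 3 m =
        pvCat (pvCat (pvByOne.getD (m / 100) "") " መቶ")
          (if m % 100 ≠ 0 then pvCat " " (subAux 2 (m % 100)) else "") := by
      conv_lhs => unfold subAux
      rw [if_neg (by omega), if_neg (by omega)]
    rw [hA]
    simp only [if_pos (show 100 ≤ m from hlow)]
    by_cases hz : m % 100 = 0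
    · simp [hz, pvCat_empty, pvJoin_singleton]
    · have hB : (if (m % 100 ≤ 19) then
          (if m % 100 ≠ 0 ∨ ([pvCat (pvByOne.getD (m / 100) "") " መቶ"] : List String) = [] then
            [pvCat (pvByOne.getD (m / 100) "") " መቶ"] ++ [pvByOne.getD (m % 100) ""]
          else [pvCat (pvByOne.getD (m / 100) "") " መቶ"])
        else
          ([pvCat (pvByOne.getD (m / 100) "") " መቶ"] ++ [pvByTen.getD (m % 100 / 10) ""]) ++
            (if m % 100 % 10 ≠ 0 then [pvByOne.getD (m % 100 % 10) ""] else []))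
          = pvCat (pvByOne.getD (m / 100) "") " መቶ" :: pvTail (m % 100) := by
        unfold pvTail
        split_ifs with h1 h2 <;> simp_all
      rw [hB]
      rcases e : pvTail (m % 100) with _ | ⟨y, rest⟩
      · exact absurd e (pvTail_ne_nil _)
      · rw [if_pos hz, pvTail_eq (m % 100) hr100 hz, e, pvJoin_cons]
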